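-- pv_equiv track=rewrite | github.com/bebing93/devil-in-details | devil_in_details/utils.py | build_alignment_mapping
-- ===== SOURCE A (Python) =====
-- from collections import defaultdict
-- from typing import List, Dict, Any, Tuple
--
-- def build_alignment_mapping(
--     alignment_line: List[List[int]], inverse=False
-- ) -> Dict[int, List[int]]:
--     """Build source-to-target alignment mapping.
--
--     Args:
--         alignment_line: List of [source_idx, target_idx] pairs
--         src2trg: If true, maps from source idx to target idx else vice-versa
--
--     Returns:
--         Dictionary mapping source indices to sorted target indices:     <source_index>: [<target_index>, <target_index>, ...]
--     """
--
--     src2trg = defaultdict(list)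
--     for src_idx, trg_idx in alignment_line:
--         if inverse:
--             src2trg[trg_idx].append(src_idx)
--         else:
--             src2trg[src_idx].append(trg_idx)
--
--     return {k: sorted(v) for k, v in src2trg.items()}
-- ===== SOURCE B (Python) =====
-- def build_alignment_mapping(alignment_line, inverse=False):
--     # Normalise every pair to (group_key, value); unpacking keeps the
--     # ValueError on malformed-length pairs.
--     pairs = [(trg_idx, src_idx) if inverse else (src_idx, trg_idx)
--              for src_idx, trg_idx in alignment_line]
--     # Keys in first-occurrence order, each starting empty.
--     result = {k: [] for k, _ in pairs}
--     # One stable sort by the value to be appended: each group's list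
--     # comes out ascending with no per-group sorted() call.
--     for k, val in sorted(pairs, key=lambda kv: kv[1]):
--         result[k].append(val)
--     return result
-- ===== Notes on version B (the rewrite author's own statement) =====
-- stated objective: alternative
-- what changed: B normalises each pair to (key, value), seeds the result keys in first-occurrence order, then does ONE stable sort of all pairs by the appended value and groups them, so each group's list is already ascending and the per-group sorted() calls disappear.
import Mathlib
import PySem

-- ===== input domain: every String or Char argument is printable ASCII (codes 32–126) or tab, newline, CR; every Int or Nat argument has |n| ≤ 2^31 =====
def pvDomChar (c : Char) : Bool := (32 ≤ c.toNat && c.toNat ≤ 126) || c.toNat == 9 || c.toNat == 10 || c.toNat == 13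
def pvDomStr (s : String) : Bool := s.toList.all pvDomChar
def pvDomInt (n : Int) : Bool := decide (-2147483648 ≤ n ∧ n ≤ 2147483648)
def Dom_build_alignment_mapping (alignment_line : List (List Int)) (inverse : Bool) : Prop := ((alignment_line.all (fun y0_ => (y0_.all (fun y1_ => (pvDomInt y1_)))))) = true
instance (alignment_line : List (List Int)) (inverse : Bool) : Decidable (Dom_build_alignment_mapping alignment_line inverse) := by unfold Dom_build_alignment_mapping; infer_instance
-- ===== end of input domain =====

-- B replaces the per-group sorted() by one stable sort of the whole line on the
-- appended component before grouping (same cost class; objective: alternative).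

-- 'src_idx, trg_idx = p' for a length-2 list p (both Pythons raise ValueError
-- otherwise; such inputs are outside Pre_, the (0, 0) default is never reached there)
def unpack2 (p : List Int) : Int × Int :=
  match p with
  | [a, b] => (a, b)
  | _ => (0, 0)

-- ===== PORT A =====
def build_alignment_mapping (alignment_line : List (List Int)) (inverse : Bool) : List (Int × List Int) :=
  let src2trg : PySem.Dict Int (List Int) :=
    alignment_line.foldl
      (fun d p =>
        let st := unpack2 p
        if inverse then d.modify st.2 [] (· ++ [st.1])
        else d.modify st.1 [] (· ++ [st.2]))
      PySem.Dict.empty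
  src2trg.items.map (fun kv => (kv.1, PySem.List.sorted kv.2 (fun x => x) false))

-- ===== PORT B =====
def build_alignment_mapping_alt (alignment_line : List (List Int)) (inverse : Bool) : List (Int × List Int) :=
  let pairs : List (Int × Int) :=
    alignment_line.map (fun p =>
      let st := unpack2 p
      if inverse then (st.2, st.1) else (st.1, st.2))
  let result0 : PySem.Dict Int (List Int) :=
    pairs.foldl (fun d q => d.insert q.1 ([] : List Int)) PySem.Dict.empty
  let result : PySem.Dict Int (List Int) :=
    (PySem.List.sorted pairs (fun q => q.2) false).foldl
      (fun d q => d.modify q.1 [] (· ++ [q.2])) result0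
  result.items

-- ===== PRECONDITION & SPEC =====
-- Pre_ excludes exactly the inputs with a pair of length ≠ 2, on which both Pythons
-- raise ValueError when unpacking.
def Pre_build_alignment_mapping (alignment_line : List (List Int)) (inverse : Bool) : Prop :=
  ∀ p ∈ alignment_line, p.length = 2
instance (alignment_line : List (List Int)) (inverse : Bool) : Decidable (Pre_build_alignment_mapping alignment_line inverse) := by unfold Pre_build_alignment_mapping; infer_instance
def pvWitness_build_alignment_mapping : List (List Int) × Bool := ([[0, 2], [1, 2], [0, 1]], false)

def Spec_build_alignment_mapping (alignment_line : List (List Int)) (inverse : Bool) (out : List (Int × List Int)) : Prop := out = build_alignment_mapping_alt alignment_line inverse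
instance (alignment_line : List (List Int)) (inverse : Bool) (out : List (Int × List Int)) : Decidable (Spec_build_alignment_mapping alignment_line inverse out) := by unfold Spec_build_alignment_mapping; infer_instance

-- ===== CLAIM (what is proved, stated in full; the proofs are below) =====
def Claim_equal_build_alignment_mapping : Prop := ∀ (alignment_line : List (List Int)) (inverse : Bool), Dom_build_alignment_mapping alignment_line inverse → Pre_build_alignment_mapping alignment_line inverse → Spec_build_alignment_mapping alignment_line inverse (build_alignment_mapping alignment_line inverse)

-- ===== LEMMAS AND PROOFS =====

-- seeding a dict with only [] values: every lookup with default [] gives []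
theorem getD_seed (l : List (Int × Int)) (d : PySem.Dict Int (List Int))
    (hd : ∀ c, d.getD c ([] : List Int) = []) (c : Int) :
    (l.foldl (fun d q => d.insert q.1 ([] : List Int)) d).getD c [] = [] := by
  induction l generalizing d with
  | nil => exact hd c
  | cons q t ih =>
      refine ih _ (fun c' => ?_)
      rw [PySem.Dict.getD_insert]
      split <;> simp [hd]

-- Set.update adds nothing when every element is already present
theorem set_update_of_mem (xs : List Int) (s : PySem.Set Int)
    (h : ∀ x ∈ xs, x ∈ s) : PySem.Set.update s xs = s := by
  induction xs generalizing s with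
  | nil => rfl
  | cons x t ih =>
      have hx : x ∈ s := h x (by simp)
      show PySem.Set.update (PySem.Set.add s x) t = s
      rw [PySem.Set.add_of_mem hx]
      exact ih s (fun y hy => h y (by simp [hy]))

-- the per-group list of the sorted line is the sorted per-group list
theorem sorted_filter_eq (pairs : List (Int × Int)) (c : Int) :
    PySem.List.sorted ((pairs.filter (fun q => q.1 == c)).map (·.2)) (fun x => x) false
      = ((PySem.List.sorted pairs (fun q => q.2) false).filter (fun q => q.1 == c)).map (·.2) := by
  apply PySem.List.sorted_id_eq_of_perm_of_pairwise
  · exact List.Perm.map _ (List.Perm.filter _ (PySem.List.sorted_perm pairs (fun q => q.2) false))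
  · have h := PySem.List.sorted_pairwise pairs (fun q => q.2)
    have h2 := List.Pairwise.sublist (List.filter_sublist (l := PySem.List.sorted pairs (fun q => q.2) false) (p := fun q => q.1 == c)) h
    exact (List.pairwise_map).mpr h2

-- the two grouping results coincide: sort-then-group = group-then-sort-each
theorem main_eq (pairs : List (Int × Int)) :
    ((pairs.foldl (fun d q => d.modify q.1 ([] : List Int) (· ++ [q.2])) PySem.Dict.empty).items.map
        (fun kv => (kv.1, PySem.List.sorted kv.2 (fun x => x) false)))
      = ((PySem.List.sorted pairs (fun q => q.2) false).foldl
          (fun d q => d.modify q.1 ([] : List Int) (· ++ [q.2]))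
          (pairs.foldl (fun d q => d.insert q.1 ([] : List Int)) PySem.Dict.empty)).items := by
  set seed : PySem.Dict Int (List Int) :=
    pairs.foldl (fun d q => d.insert q.1 ([] : List Int)) PySem.Dict.empty with hseed
  set dA : PySem.Dict Int (List Int) :=
    pairs.foldl (fun d q => d.modify q.1 ([] : List Int) (· ++ [q.2])) PySem.Dict.empty with hdA
  set dB : PySem.Dict Int (List Int) :=
    (PySem.List.sorted pairs (fun q => q.2) false).foldl
      (fun d q => d.modify q.1 ([] : List Int) (· ++ [q.2])) seed with hdB
  have hndA : dA.keys.Nodup := by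
    rw [hdA]
    exact PySem.Dict.nodup_keys_foldl_modify_key pairs (fun q => q.1) []
      (fun _ q => (· ++ [q.2])) PySem.Dict.empty (by simp [PySem.Dict.keys_empty])
  have hkeysA : dA.keys = PySem.Set.ofList (pairs.map (fun q => q.1)) := by
    rw [hdA, PySem.Dict.keys_foldl_modify_key]
    simp [PySem.Dict.keys_empty, PySem.Set.update_nil_left]
  have hvalsA : ∀ c, dA.getD c [] = (pairs.filter (fun q => q.1 == c)).map (fun q => q.2) := by
    intro c
    rw [hdA, PySem.Dict.getD_foldl_modify_append]
    simp [PySem.Dict.getD_empty]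
  have hkeysSeed : seed.keys = PySem.Set.ofList (pairs.map (fun q => q.1)) := by
    rw [hseed, PySem.Dict.keys_foldl_insert_key]
    simp [PySem.Dict.keys_empty, PySem.Set.update_nil_left]
  have hndSeed : seed.keys.Nodup := by
    rw [hseed]
    exact PySem.Dict.nodup_keys_foldl_insert_key pairs (fun q => q.1)
      (fun _ _ => []) PySem.Dict.empty (by simp [PySem.Dict.keys_empty])
  have hseedD : ∀ c, seed.getD c ([] : List Int) = [] := by
    intro c
    rw [hseed]
    exact getD_seed pairs PySem.Dict.empty (fun c' => by simp [PySem.Dict.getD_empty]) c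
  have hkeysB : dB.keys = seed.keys := by
    rw [hdB, PySem.Dict.keys_foldl_modify_key]
    apply set_update_of_mem
    intro x hx
    obtain ⟨q, hq, rfl⟩ := List.mem_map.mp hx
    rw [hkeysSeed, PySem.Set.mem_ofList]
    exact List.mem_map.mpr ⟨q, (PySem.List.mem_sorted _ _ _ _).mp hq, rfl⟩
  have hndB : dB.keys.Nodup := by
    rw [hdB]
    exact PySem.Dict.nodup_keys_foldl_modify_key _ (fun (q : Int × Int) => q.1) []
      (fun _ (q : Int × Int) => (· ++ [q.2])) seed hndSeed
  have hvalsB : ∀ c, dB.getD c [] =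
      ((PySem.List.sorted pairs (fun q => q.2) false).filter (fun q => q.1 == c)).map (fun q => q.2) := by
    intro c
    rw [hdB, PySem.Dict.getD_foldl_modify_append, hseedD]
    simp
  rw [PySem.Dict.items_eq_map_keys dA hndA [], PySem.Dict.items_eq_map_keys dB hndB [],
    List.map_map, hkeysB, hkeysSeed, ← hkeysA]
  apply List.map_congr_left
  intro c _
  simp only [Function.comp]
  rw [hvalsA, hvalsB, sorted_filter_eq]

-- ===== VERDICT (by name: the statement is the Claim_ definition above) =====
theorem build_alignment_mapping_spec : Claim_equal_build_alignment_mapping := by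
  intro L inverse _ _
  unfold Spec_build_alignment_mapping build_alignment_mapping build_alignment_mapping_alt
  have hA :
      (L.foldl
        (fun d p =>
          let st := unpack2 p
          if inverse then d.modify st.2 [] (· ++ [st.1])
          else d.modify st.1 [] (· ++ [st.2]))
        PySem.Dict.empty)
      = (L.map (fun p =>
          let st := unpack2 p
          if inverse then (st.2, st.1) else (st.1, st.2))).foldl
          (fun d q => d.modify q.1 ([] : List Int) (· ++ [q.2])) PySem.Dict.empty := by
    rw [List.foldl_map]
    apply PySem.List.foldl_congr_mem
    intro acc p _
    by_cases h : inverse <;> simp [h]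
  simp only [hA]
  exact main_eq _
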